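-- pv_equiv track=rewrite | github.com/Bunnyton/hashpass | templates/dvs/shell.py | search_subcmd
-- ===== SOURCE A (Python) =====
-- def search_subcmd(cmd: list, subcmd: list):
--     if subcmd:
--         for part in cmd:
--             if isinstance(part, list) and len(subcmd) < len(part):
--                 for offset in range(len(part) - len(subcmd) + 1):
--                     if part[offset] == subcmd[0] and part[offset : offset + len(subcmd)] == subcmd:
--                         return True
--     return False
-- ===== SOURCE B (Python) =====
-- def _is_infix(needle, hay):
--     # slide by dropping the head of hay; a match is a pointwise-equal prefix
--     while len(needle) <= len(hay):
--         if all(a == b for a, b in zip(needle, hay)):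
--             return True
--         hay = hay[1:]
--     return False
--
--
-- def search_subcmd(cmd: list, subcmd: list):
--     if not subcmd:
--         return False
--     return any(isinstance(part, list) and _is_infix(subcmd, part) for part in cmd)
-- ===== Notes on version B (the rewrite author's own statement) =====
-- stated objective: simpler
-- what changed: Replaces the index/offset loop with slicing by a head-dropping contiguous-subsequence test (prefix check + recurse on the tail), and fixes the off-by-one length guard so a part exactly equal to subcmd counts as a match.
-- intended difference: When subcmd is nonempty, some part of cmd is exactly equal to subcmd, and no longer part contains subcmd, A returns False (its strict guard len(subcmd) < len(part) skips equal-length parts) while B returns True; a part identical to subcmd plainly contains it, so True is the intended value. — e.g. on search_subcmd([[1, 2]], [1, 2]): A returns false, B returns true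
import Mathlib
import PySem

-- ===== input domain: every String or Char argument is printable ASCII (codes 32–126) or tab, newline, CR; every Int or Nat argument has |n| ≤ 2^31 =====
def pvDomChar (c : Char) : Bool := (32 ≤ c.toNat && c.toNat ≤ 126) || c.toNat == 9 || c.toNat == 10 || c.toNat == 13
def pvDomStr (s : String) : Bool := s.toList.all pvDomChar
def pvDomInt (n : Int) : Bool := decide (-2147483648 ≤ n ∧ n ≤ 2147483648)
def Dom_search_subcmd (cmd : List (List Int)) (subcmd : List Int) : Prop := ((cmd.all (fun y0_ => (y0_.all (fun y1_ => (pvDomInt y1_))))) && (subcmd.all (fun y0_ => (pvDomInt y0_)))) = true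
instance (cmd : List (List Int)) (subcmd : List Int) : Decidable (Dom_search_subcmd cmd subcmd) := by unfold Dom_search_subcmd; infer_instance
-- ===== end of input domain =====

-- B is a head-dropping contiguous-subsequence test; A is an offset loop with a strict
-- (off-by-one) length guard. Ports below; the difference region is D_search_subcmd.

-- ===== PORT A =====
-- for part in cmd / for offset in range(...) with early 'return True' ported as List.any
def search_subcmd (cmd : List (List Int)) (subcmd : List Int) : Bool :=
  if subcmd ≠ [] then
    cmd.any (fun part =>
      if subcmd.length < part.length then
        (PySem.List.pyRange 0 ((part.length : Int) - (subcmd.length : Int) + 1) 1).any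
          (fun offset =>
            PySem.List.pyGet? part offset == PySem.List.pyGet? subcmd 0 &&
            PySem.List.slice part (some offset) (some (offset + (subcmd.length : Int))) == subcmd)
      else false)
  else false

-- ===== PORT B =====
-- Source B's while loop: compare a zipped prefix, else drop hay's head and repeat
def isInfixLoop (needle hay : List Int) : Bool :=
  if needle.length ≤ hay.length then
    if (needle.zip hay).all (fun p => p.1 == p.2) then true
    else
      match hay with
      | [] => false
      | _ :: t => isInfixLoop needle t
  else false
termination_by structural hay

def search_subcmd_alt (cmd : List (List Int)) (subcmd : List Int) : Bool :=
  if subcmd = [] then false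
  else cmd.any (fun part => isInfixLoop subcmd part)

-- ===== PRECONDITION & SPEC =====
-- When subcmd is nonempty, some part of cmd is exactly equal to subcmd, and no longer part
-- contains subcmd, A returns False (its strict guard len(subcmd) < len(part) skips
-- equal-length parts) while B returns True; a part identical to subcmd plainly contains it,
-- so True is the intended value.
def D_search_subcmd (cmd : List (List Int)) (subcmd : List Int) : Prop :=
  subcmd ≠ [] ∧ subcmd ∈ cmd ∧
    ∀ p ∈ cmd, ¬(subcmd.length < p.length ∧ subcmd <:+: p)
instance (cmd : List (List Int)) (subcmd : List Int) : Decidable (D_search_subcmd cmd subcmd) := by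
  unfold D_search_subcmd; infer_instance

def Spec_search_subcmd (cmd : List (List Int)) (subcmd : List Int) (out : Bool) : Prop :=
  ¬ D_search_subcmd cmd subcmd → out = search_subcmd_alt cmd subcmd
instance (cmd : List (List Int)) (subcmd : List Int) (out : Bool) : Decidable (Spec_search_subcmd cmd subcmd out) := by
  unfold Spec_search_subcmd; infer_instance

def pvDiffWitness_search_subcmd : List (List Int) × List Int := ([[1, 2]], [1, 2])
def pvDiffWitnessOut_search_subcmd : Bool × Bool := (false, true)

-- ===== CLAIM (what is proved, stated in full; the proofs are below) =====
def Claim_unchanged_search_subcmd : Prop := ∀ (cmd : List (List Int)) (subcmd : List Int), Dom_search_subcmd cmd subcmd → Spec_search_subcmd cmd subcmd (search_subcmd cmd subcmd)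
def Claim_changed_search_subcmd : Prop := Dom_search_subcmd (pvDiffWitness_search_subcmd.1) (pvDiffWitness_search_subcmd.2) ∧ D_search_subcmd (pvDiffWitness_search_subcmd.1) (pvDiffWitness_search_subcmd.2) ∧ search_subcmd (pvDiffWitness_search_subcmd.1) (pvDiffWitness_search_subcmd.2) = pvDiffWitnessOut_search_subcmd.1 ∧ search_subcmd_alt (pvDiffWitness_search_subcmd.1) (pvDiffWitness_search_subcmd.2) = pvDiffWitnessOut_search_subcmd.2 ∧ pvDiffWitnessOut_search_subcmd.1 ≠ pvDiffWitnessOut_search_subcmd.2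
def Claim_exact_search_subcmd : Prop := ∀ (cmd : List (List Int)) (subcmd : List Int), Dom_search_subcmd cmd subcmd → D_search_subcmd cmd subcmd → search_subcmd cmd subcmd ≠ search_subcmd_alt cmd subcmd

-- ===== LEMMAS AND PROOFS =====

theorem zip_all_eq_iff_prefix (s xs : List Int) (h : s.length ≤ xs.length) :
    ((s.zip xs).all (fun p => p.1 == p.2) = true) ↔ s <+: xs := by
  induction s generalizing xs with
  | nil => simp
  | cons a t ih =>
    cases xs with
    | nil => simp at h
    | cons b u =>
      simp only [List.length_cons, Nat.add_le_add_iff_right] at h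
      rw [List.cons_prefix_cons]
      simp only [List.zip_cons_cons, List.all_cons, Bool.and_eq_true, beq_iff_eq]
      rw [ih u h]

theorem isInfixLoop_iff (s xs : List Int) :
    isInfixLoop s xs = true ↔ s <:+: xs := by
  induction xs with
  | nil =>
    rw [isInfixLoop]
    by_cases hs : s = []
    · subst hs; simp
    · have : ¬ s.length ≤ ([] : List Int).length := by
        simp [List.length_eq_zero_iff]; exact hs
      simp [List.infix_nil, hs]
  | cons b u ih =>
    rw [isInfixLoop]
    by_cases hlen : s.length ≤ (b :: u).length
    · rw [if_pos hlen]
      by_cases hp : (s.zip (b :: u)).all (fun p => p.1 == p.2) = true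
      · simp only [hp, if_true, true_iff]
        exact ((zip_all_eq_iff_prefix s (b :: u) hlen).1 hp).isInfix
      · simp only [hp, Bool.false_eq_true, ite_false, ih]
        rw [List.infix_cons_iff]
        constructor
        · exact Or.inr
        · rintro (hpre | hinf)
          · exact absurd ((zip_all_eq_iff_prefix s (b :: u) hlen).2 hpre) hp
          · exact hinf
    · rw [if_neg hlen]
      simp only [Bool.false_eq_true, false_iff]
      intro hinf
      exact hlen hinf.length_le

theorem drop_take_infix (xs : List Int) (j m : ℕ) : ((xs.drop j).take m) <:+: xs :=
  ((xs.drop j).take_prefix m).isInfix.trans (xs.drop_suffix j).isInfix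

-- A's inner offset loop finds subcmd iff it is an infix (given the strict length guard)
theorem inner_any_iff (s xs : List Int) (hs : s ≠ []) (hlt : s.length < xs.length) :
    ((PySem.List.pyRange 0 ((xs.length : Int) - (s.length : Int) + 1) 1).any
      (fun offset =>
        PySem.List.pyGet? xs offset == PySem.List.pyGet? s 0 &&
        PySem.List.slice xs (some offset) (some (offset + (s.length : Int))) == s) = true)
    ↔ s <:+: xs := by
  rw [List.any_eq_true]
  constructor
  · rintro ⟨i, hi, hf⟩
    rw [PySem.List.mem_pyRange_one] at hi
    obtain ⟨hi0, hiu⟩ := hi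
    obtain ⟨j, rfl⟩ := Int.eq_ofNat_of_zero_le hi0
    simp only [Bool.and_eq_true, beq_iff_eq] at hf
    have hslice := hf.2
    rw [PySem.List.slice_natCast_add] at hslice
    rw [← hslice]
    exact drop_take_infix xs j s.length
  · rintro ⟨t1, t2, rfl⟩
    have hx : t1 ++ s ++ t2 = t1 ++ (s ++ t2) := List.append_assoc t1 s t2
    have hlen : (t1 ++ s ++ t2).length = t1.length + s.length + t2.length := by
      simp [List.length_append]; omega
    refine ⟨(t1.length : Int), ?_, ?_⟩
    · rw [PySem.List.mem_pyRange_one]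
      constructor
      · exact_mod_cast Nat.zero_le _
      · rw [hlen]; push_cast; omega
    · simp only [Bool.and_eq_true, beq_iff_eq]
      constructor
      · rw [show (0 : Int) = ((0 : ℕ) : Int) from rfl,
            PySem.List.pyGet?_natCast, PySem.List.pyGet?_natCast]
        rw [hx, List.getElem?_append_right (le_refl t1.length)]
        simp only [Nat.sub_self]
        cases s with
        | nil => exact absurd rfl hs
        | cons a t => simp
      · rw [PySem.List.slice_natCast_add, hx, List.drop_left]
        exact List.take_left

-- characterisations of the two ports for nonempty subcmd
theorem portA_iff (cmd : List (List Int)) (s : List Int) (hs : s ≠ []) :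
    (search_subcmd cmd s = true) ↔ ∃ p ∈ cmd, s.length < p.length ∧ s <:+: p := by
  unfold search_subcmd
  rw [if_pos hs, List.any_eq_true]
  constructor
  · rintro ⟨p, hp, hf⟩
    by_cases hl : s.length < p.length
    · rw [if_pos hl] at hf
      exact ⟨p, hp, hl, (inner_any_iff s p hs hl).1 hf⟩
    · rw [if_neg hl] at hf; exact absurd hf (by simp)
  · rintro ⟨p, hp, hl, hinf⟩
    exact ⟨p, hp, by rw [if_pos hl]; exact (inner_any_iff s p hs hl).2 hinf⟩

theorem portB_iff (cmd : List (List Int)) (s : List Int) (hs : s ≠ []) :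
    (search_subcmd_alt cmd s = true) ↔ ∃ p ∈ cmd, s <:+: p := by
  unfold search_subcmd_alt
  rw [if_neg hs, List.any_eq_true]
  exact exists_congr fun p => and_congr_right fun _ => isInfixLoop_iff s p

-- ===== VERDICT (by name: the statement is the Claim_ definition above) =====
theorem search_subcmd_spec : Claim_unchanged_search_subcmd := by
  intro cmd s _hdom hnd
  by_cases hs : s = []
  · subst hs
    simp [search_subcmd, search_subcmd_alt]
  · rw [Bool.eq_iff_iff, portA_iff cmd s hs, portB_iff cmd s hs]
    constructor
    · rintro ⟨p, hp, _, hinf⟩; exact ⟨p, hp, hinf⟩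
    · rintro ⟨p, hp, hinf⟩
      by_cases hl : s.length < p.length
      · exact ⟨p, hp, hl, hinf⟩
      · -- p is no longer than s, so the infix forces p = s, i.e. s ∈ cmd;
        -- ¬D_ then yields some strictly longer containing part
        have hps : s = p := hinf.eq_of_length (le_antisymm hinf.length_le (by omega))
        subst hps
        unfold D_search_subcmd at hnd
        push Not at hnd
        obtain ⟨q, hq, hql, hqinf⟩ := hnd hs hp
        exact ⟨q, hq, hql, hqinf⟩

theorem search_subcmd_changed : Claim_changed_search_subcmd := by
  unfold Claim_changed_search_subcmd; decide

theorem search_subcmd_tight : Claim_exact_search_subcmd := by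
  intro cmd s _hdom hd
  obtain ⟨hs, hmem, hnone⟩ := hd
  have hA : search_subcmd cmd s = false := by
    rw [← Bool.not_eq_true, portA_iff cmd s hs]
    rintro ⟨p, hp, hl, hinf⟩
    exact hnone p hp ⟨hl, hinf⟩
  have hB : search_subcmd_alt cmd s = true :=
    (portB_iff cmd s hs).2 ⟨s, hmem, List.infix_refl s⟩
  rw [hA, hB]; simp
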